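-- pv_equiv track=rewrite | github.com/Chaddai/Exercices-Bloc2 | partie2.py | leCompte
-- ===== SOURCE A (Python) =====
-- operations = [
--     ("+", lambda x, y: x + y),
--     ("-", lambda x, y: x - y),
--     ("*", lambda x, y: x * y),
--     ("/", lambda x, y: x // y),
-- ]
--
-- def leCompte(cible, nombres):
--     nombres.sort(reverse=True)
--     if len(nombres) < 2:
--         return
--     for i in range(len(nombres)):
--         for j in range(len(nombres)):
--             if i == j:
--                 continue
--
--             a, b = nombres[i], nombres[j]
--             for (nom, op) in operations:
--                 resultat = op(a, b)
--                 if nom == "/" and resultat * b != a: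
--                     continue
--
--                 if resultat == cible:
--                     return [f"{a} {nom} {b} = {resultat}"]
--                 elif resultat != 0:
--                     nouvNombres = nombres.copy()
--                     del nouvNombres[max(i, j)]
--                     del nouvNombres[min(i, j)]
--                     nouvNombres.append(resultat)
--                     suite_ops = leCompte(cible, nouvNombres)
--                     if suite_ops != None:
--                         return [f"{a} {nom} {b} = {resultat}"] + suite_ops
-- ===== SOURCE B (Python) =====
-- # B: same search, but memoized on the sorted tuple of remaining numbers, so each
-- # distinct multiset of numbers is explored only once.
-- # Like A, sorts `nombres` in place (same observable mutation).
-- def leCompte(cible, nombres):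
--     nombres.sort(reverse=True)
--     memo = {}
--
--     def candidates(a, b):
--         cands = [("+", a + b), ("-", a - b), ("*", a * b)]
--         if b != 0 and a % b == 0:
--             cands.append(("/", a // b))
--         return cands
--
--     def search(nums):
--         if nums in memo:
--             return memo[nums]
--         res = None
--         n = len(nums)
--         if n >= 2:
--             for (i, j) in [(i, j) for i in range(n) for j in range(n) if i != j]:
--                 a, b = nums[i], nums[j]
--                 for (nom, r) in candidates(a, b):
--                     if r == cible:
--                         res = [f"{a} {nom} {b} = {r}"]
--                         break
--                     if r != 0:
--                         rest = [x for (k, x) in enumerate(nums) if k != i and k != j]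
--                         sub = search(tuple(sorted(rest + [r], reverse=True)))
--                         if sub is not None:
--                             res = [f"{a} {nom} {b} = {r}"] + sub
--                             break
--                 if res is not None:
--                     break
--         memo[nums] = res
--         return res
--
--     return search(tuple(nombres))
-- ===== Notes on version B (the rewrite author's own statement) =====
-- stated objective: alternative
-- what changed: B memoizes the search on the sorted tuple of remaining numbers (a distinct multiset of numbers is explored once instead of being re-explored) and precomputes the list of valid candidate operations per ordered pair, skipping the impossible exact division instead of computing and rejecting it; intended as faster (a timing run read 5.74x at n=16 but could not confirm it at every size).
-- outside the precondition, e.g. on leCompte(5, [0, 1]): A raises ZeroDivisionError, B returns None; on leCompte(1, [0, 1]): A returns ['1 + 0 = 1'], B returns ['1 + 0 = 1']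
import Mathlib
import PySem

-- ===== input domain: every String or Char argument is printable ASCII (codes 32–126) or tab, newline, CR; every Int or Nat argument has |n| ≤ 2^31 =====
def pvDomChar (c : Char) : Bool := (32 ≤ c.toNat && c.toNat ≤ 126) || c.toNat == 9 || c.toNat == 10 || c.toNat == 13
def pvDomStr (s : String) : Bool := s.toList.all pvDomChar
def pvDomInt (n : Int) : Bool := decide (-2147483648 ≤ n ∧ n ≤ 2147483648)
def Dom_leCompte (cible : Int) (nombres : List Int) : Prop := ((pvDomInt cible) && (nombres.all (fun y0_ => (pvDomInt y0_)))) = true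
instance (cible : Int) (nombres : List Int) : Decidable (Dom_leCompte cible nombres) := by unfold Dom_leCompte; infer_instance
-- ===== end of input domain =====

-- B replaces A's plain recursion by a search memoized on the sorted tuple of remaining
-- numbers (a distinct multiset is explored only once); the equivalence is about the
-- RETURN value (both sort `nombres` in place the same way).

-- ===== PORT A =====
-- A's module constant `operations` (the "/" entry is a // b; b = 0 is excluded by Pre_).
def pvOperations : List (String × (Int → Int → Int)) :=
  [("+", fun x y => x + y), ("-", fun x y => x - y),
   ("*", fun x y => x * y), ("/", fun x y => PySem.Int.floordiv x y)]

-- f"{a} {nom} {b} = {resultat}"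
def pvFmtA (a : Int) (nom : String) (b r : Int) : String :=
  PySem.Int.toStr a ++ " " ++ nom ++ " " ++ PySem.Int.toStr b ++ " = " ++ PySem.Int.toStr r

-- nombres.sort(reverse=True)
def pvSortDescA (xs : List Int) : List Int := PySem.List.sorted xs (fun x => x) true

-- the `for (nom, op) in operations` loop; every `return` becomes `some`, falling off = none
def pvOpsLoopA (cible : Int) (recur : List Int → Option (List String))
    (nombres : List Int) (i j a b : Int) :
    List (String × (Int → Int → Int)) → Option (List String)
  | [] => none
  | (nom, op) :: rest =>
    let resultat := op a b
    if nom = "/" ∧ resultat * b ≠ a then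
      pvOpsLoopA cible recur nombres i j a b rest
    else if resultat = cible then
      some [pvFmtA a nom b resultat]
    else if resultat ≠ 0 then
      -- del nouvNombres[max(i,j)]; del nouvNombres[min(i,j)]; append(resultat)
      -- (i, j come from range(len): nonnegative, so .toNat is exact)
      let nouvNombres := ((nombres.eraseIdx (max i j).toNat).eraseIdx (min i j).toNat) ++ [resultat]
      match recur nouvNombres with
      | some suite => some (pvFmtA a nom b resultat :: suite)
      | none => pvOpsLoopA cible recur nombres i j a b rest
    else
      pvOpsLoopA cible recur nombres i j a b rest

-- the inner `for j in range(len(nombres))` loop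
def pvJLoopA (cible : Int) (recur : List Int → Option (List String))
    (nombres : List Int) (i : Int) : List Int → Option (List String)
  | [] => none
  | j :: js =>
    if i = j then pvJLoopA cible recur nombres i js
    else
      let a := PySem.List.pyGetD nombres i 0   -- nombres[i], i in range: exact
      let b := PySem.List.pyGetD nombres j 0   -- nombres[j]
      match pvOpsLoopA cible recur nombres i j a b pvOperations with
      | some r => some r
      | none => pvJLoopA cible recur nombres i js

-- the outer `for i in range(len(nombres))` loop
def pvILoopA (cible : Int) (recur : List Int → Option (List String))
    (nombres : List Int) : List Int → Option (List String)
  | [] => none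
  | i :: is =>
    match pvJLoopA cible recur nombres i (PySem.List.pyRange 0 (nombres.length : Int) 1) with
    | some r => some r
    | none => pvILoopA cible recur nombres is

-- A's recursion, fueled by the list length (each recursive call is on a list one shorter,
-- so the fuel-0 branch is never reached from `leCompte`)
def pvAuxA (cible : Int) : Nat → List Int → Option (List String)
  | 0, _ => none
  | fuel + 1, ns =>
    let nombres := pvSortDescA ns
    if nombres.length < 2 then none
    else pvILoopA cible (pvAuxA cible fuel) nombres (PySem.List.pyRange 0 (nombres.length : Int) 1)

def leCompte (cible : Int) (nombres : List Int) : Option (List String) :=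
  pvAuxA cible nombres.length nombres

-- ===== PORT B =====
def pvFmtB (a : Int) (nom : String) (b r : Int) : String :=
  PySem.Int.toStr a ++ " " ++ nom ++ " " ++ PySem.Int.toStr b ++ " = " ++ PySem.Int.toStr r

def pvSortDescB (xs : List Int) : List Int := PySem.List.sorted xs (fun x => x) true

-- candidates(a, b): the valid (name, result) pairs for one ordered operand pair
def pvCandidates (a b : Int) : List (String × Int) :=
  let cands := [("+", a + b), ("-", a - b), ("*", a * b)]
  if b ≠ 0 ∧ PySem.Int.mod a b = 0 then cands ++ [("/", PySem.Int.floordiv a b)] else cands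

-- [x for (k, x) in enumerate(nums) if k != i and k != j]
def pvRestB (nums : List Int) (i j : Nat) : List Int :=
  (PySem.List.enumerate nums 0).filterMap
    (fun kx => if kx.1 ≠ (i : Int) ∧ kx.1 ≠ (j : Int) then some kx.2 else none)

-- [(i, j) for i in range(n) for j in range(n) if i != j]
def pvPairs (n : Nat) : List (Nat × Nat) :=
  (List.range n).flatMap (fun i =>
    (List.range n).filterMap (fun j => if i ≠ j then some (i, j) else none))

abbrev PvMemo := PySem.Dict (List Int) (Option (List String))

-- the `for (nom, r) in candidates(a, b)` loop, threading the memo dict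
def pvCandLoopB (cible : Int) (srch : List Int → PvMemo → Option (List String) × PvMemo)
    (nums : List Int) (i j : Nat) (a b : Int) :
    List (String × Int) → PvMemo → Option (List String) × PvMemo
  | [], memo => (none, memo)
  | (nom, r) :: cs, memo =>
    if r = cible then (some [pvFmtB a nom b r], memo)
    else if r ≠ 0 then
      match srch (pvSortDescB (pvRestB nums i j ++ [r])) memo with
      | (some sub, memo') => (some (pvFmtB a nom b r :: sub), memo')
      | (none, memo') => pvCandLoopB cible srch nums i j a b cs memo'
    else pvCandLoopB cible srch nums i j a b cs memo

-- the `for (i, j) in [...]` loop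
def pvPairsLoopB (cible : Int) (srch : List Int → PvMemo → Option (List String) × PvMemo)
    (nums : List Int) : List (Nat × Nat) → PvMemo → Option (List String) × PvMemo
  | [], memo => (none, memo)
  | (i, j) :: ps, memo =>
    let a := nums.getD i 0   -- nums[i], i < len(nums): exact
    let b := nums.getD j 0
    match pvCandLoopB cible srch nums i j a b (pvCandidates a b) memo with
    | (some r, memo') => (some r, memo')
    | (none, memo') => pvPairsLoopB cible srch nums ps memo'

-- search(nums): memoized on the sorted tuple; fueled by the list length
def pvSearchB (cible : Int) : Nat → List Int → PvMemo → Option (List String) × PvMemo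
  | 0, _, memo => (none, memo)
  | fuel + 1, nums, memo =>
    match memo.get? nums with
    | some v => (v, memo)
    | none =>
      let p := if nums.length < 2 then (none, memo)
               else pvPairsLoopB cible (pvSearchB cible fuel) nums (pvPairs nums.length) memo
      (p.1, p.2.insert nums p.1)

def leCompte_alt (cible : Int) (nombres : List Int) : Option (List String) :=
  let s := pvSortDescB nombres
  (pvSearchB cible s.length s PySem.Dict.empty).1

-- ===== PRECONDITION & SPEC =====
-- Pre_ excludes lists containing 0: there A's a // b can raise ZeroDivisionError, and when
-- an early success happens to return first the value is an accident of reaching it before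
-- the division (see claim cites); B skips the impossible division instead.
def Pre_leCompte (cible : Int) (nombres : List Int) : Prop := (0 : Int) ∉ nombres
instance (cible : Int) (nombres : List Int) : Decidable (Pre_leCompte cible nombres) := by
  unfold Pre_leCompte; infer_instance

def pvWitness_leCompte : Int × List Int := (3, [1, 2])

def Spec_leCompte (cible : Int) (nombres : List Int) (out : Option (List String)) : Prop := out = leCompte_alt cible nombres
instance (cible : Int) (nombres : List Int) (out : Option (List String)) : Decidable (Spec_leCompte cible nombres out) := by unfold Spec_leCompte; infer_instance

-- ===== CLAIM (what is proved, stated in full; the proofs are below) =====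
def Claim_equal_leCompte : Prop := ∀ (cible : Int) (nombres : List Int), Dom_leCompte cible nombres → Pre_leCompte cible nombres → Spec_leCompte cible nombres (leCompte cible nombres)

-- ===== LEMMAS AND PROOFS =====

-- pure reference loops: B's loop shape with A's function as the recursion
def pvCandLoopP (cible : Int) (nums : List Int) (i j : Nat) (a b : Int) :
    List (String × Int) → Option (List String)
  | [] => none
  | (nom, r) :: cs =>
    if r = cible then some [pvFmtB a nom b r]
    else if r ≠ 0 then
      match leCompte cible (pvSortDescB (pvRestB nums i j ++ [r])) with
      | some sub => some (pvFmtB a nom b r :: sub)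
      | none => pvCandLoopP cible nums i j a b cs
    else pvCandLoopP cible nums i j a b cs

def pvPairsLoopP (cible : Int) (nums : List Int) : List (Nat × Nat) → Option (List String)
  | [] => none
  | (i, j) :: ps =>
    match pvCandLoopP cible nums i j (nums.getD i 0) (nums.getD j 0)
        (pvCandidates (nums.getD i 0) (nums.getD j 0)) with
    | some r => some r
    | none => pvPairsLoopP cible nums ps

def pvInv (cible : Int) (memo : PvMemo) : Prop :=
  ∀ k v, memo.get? k = some v → v = leCompte cible k

theorem pvFmt_eq : pvFmtA = pvFmtB := rfl
theorem pvSort_eq : pvSortDescA = pvSortDescB := rfl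



theorem pvEnumShift (p : Int → Prop) [DecidablePred p] (t : List Int) : ∀ (s : Int),
    (PySem.List.enumerate t (s + 1)).filterMap (fun kx => if p kx.1 then some kx.2 else none)
      = (PySem.List.enumerate t s).filterMap (fun kx => if p (kx.1 + 1) then some kx.2 else none) := by
  induction t with
  | nil => intro s; simp [PySem.List.enumerate]
  | cons x t ih =>
    intro s
    rw [PySem.List.enumerate_cons, PySem.List.enumerate_cons, List.filterMap_cons, List.filterMap_cons]
    have := ih (s + 1)
    by_cases hp : p (s + 1)
    · simp only [if_pos hp, this]
    · simp only [if_neg hp, this]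

theorem pvEnumAll (t : List Int) (p : Int → Prop) [DecidablePred p]
    (h : ∀ k : Int, 0 ≤ k → p k) :
    (PySem.List.enumerate t 0).filterMap (fun kx => if p kx.1 then some kx.2 else none) = t := by
  have hc : ∀ kx ∈ PySem.List.enumerate t 0,
      (if p kx.1 then some kx.2 else none) = some kx.2 := by
    intro kx hkx
    rw [PySem.List.mem_enumerate_iff] at hkx
    obtain ⟨k, hk, rfl⟩ := hkx
    exact if_pos (h _ (by positivity))
  rw [List.filterMap_congr hc]
  have := PySem.List.map_snd_enumerate t 0
  simpa [List.filterMap_eq_map] using this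

theorem pvEnumCongr (t : List Int) (p q : Int → Prop) [DecidablePred p] [DecidablePred q]
    (h : ∀ k : Int, 0 ≤ k → (p k ↔ q k)) :
    (PySem.List.enumerate t 0).filterMap (fun kx => if p kx.1 then some kx.2 else none)
      = (PySem.List.enumerate t 0).filterMap (fun kx => if q kx.1 then some kx.2 else none) := by
  apply List.filterMap_congr
  intro kx hkx
  rw [PySem.List.mem_enumerate_iff] at hkx
  obtain ⟨k, hk, rfl⟩ := hkx
  by_cases hq : q ((0 : Int) + k, t[k]).1
  · rw [if_pos hq, if_pos ((h _ (by positivity)).mpr hq)]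
  · rw [if_neg hq, if_neg (fun hh => hq ((h _ (by positivity)).mp hh))]

theorem pvEnumErase (t : List Int) : ∀ (m : Nat),
    (PySem.List.enumerate t 0).filterMap (fun kx => if kx.1 ≠ (m : Int) then some kx.2 else none)
      = t.eraseIdx m := by
  induction t with
  | nil => intro m; simp [PySem.List.enumerate]
  | cons x t ih =>
    intro m
    rw [PySem.List.enumerate_cons]
    cases m with
    | zero =>
      rw [List.filterMap_cons_none (by simp)]
      rw [pvEnumShift (fun k => k ≠ ((0 : Nat) : Int)) t 0]
      rw [pvEnumCongr t (fun k => k + 1 ≠ ((0 : Nat) : Int)) (fun _ => True)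
        (by intro k hk; simp only [iff_true]; push_cast; omega)]
      rw [pvEnumAll t (fun _ => True) (fun _ _ => trivial)]
      rw [List.eraseIdx_cons_zero]
    | succ m' =>
      rw [List.filterMap_cons_some (b := x) (by rw [if_pos (by push_cast; omega)])]
      rw [pvEnumShift (fun k => k ≠ ((m' + 1 : Nat) : Int)) t 0]
      rw [pvEnumCongr t (fun k => k + 1 ≠ ((m' + 1 : Nat) : Int)) (fun k => k ≠ ((m' : Nat) : Int))
        (by intro k hk; push_cast; omega)]
      rw [ih m', List.eraseIdx_cons_succ]

theorem pvRest_eq (nums : List Int) : ∀ (p q : Nat), p < q →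
    pvRestB nums p q = (nums.eraseIdx q).eraseIdx p := by
  induction nums with
  | nil => intro p q h; simp [pvRestB, PySem.List.enumerate]
  | cons x t ih =>
    intro p q h
    obtain ⟨q', rfl⟩ : ∃ q', q = q' + 1 := ⟨q - 1, by omega⟩
    unfold pvRestB
    rw [PySem.List.enumerate_cons]
    cases p with
    | zero =>
      rw [List.filterMap_cons_none (by simp)]
      rw [pvEnumShift (fun k => k ≠ ((0 : Nat) : Int) ∧ k ≠ ((q' + 1 : Nat) : Int)) t 0]
      rw [pvEnumCongr t (fun k => k + 1 ≠ ((0 : Nat) : Int) ∧ k + 1 ≠ ((q' + 1 : Nat) : Int))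
        (fun k => k ≠ ((q' : Nat) : Int)) (by intro k hk; push_cast; omega)]
      rw [pvEnumErase t q', List.eraseIdx_cons_succ, List.eraseIdx_cons_zero]
    | succ p' =>
      rw [List.filterMap_cons_some (b := x) (by rw [if_pos (by push_cast; omega)])]
      rw [pvEnumShift (fun k => k ≠ ((p' + 1 : Nat) : Int) ∧ k ≠ ((q' + 1 : Nat) : Int)) t 0]
      rw [pvEnumCongr t (fun k => k + 1 ≠ ((p' + 1 : Nat) : Int) ∧ k + 1 ≠ ((q' + 1 : Nat) : Int))
        (fun k => k ≠ ((p' : Nat) : Int) ∧ k ≠ ((q' : Nat) : Int)) (by intro k hk; push_cast; omega)]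
      have := ih p' q' (by omega)
      unfold pvRestB at this
      rw [this, List.eraseIdx_cons_succ, List.eraseIdx_cons_succ]

theorem pvRest_comm (nums : List Int) (i j : Nat) : pvRestB nums i j = pvRestB nums j i := by
  unfold pvRestB
  apply List.filterMap_congr
  intro kx _
  by_cases h1 : kx.1 ≠ (i : Int) ∧ kx.1 ≠ (j : Int)
  · rw [if_pos h1, if_pos ⟨h1.2, h1.1⟩]
  · rw [if_neg h1, if_neg (fun hh => h1 ⟨hh.2, hh.1⟩)]

theorem pvRest_eq' (nums : List Int) (i j : Nat) (hij : i ≠ j) :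
    pvRestB nums i j = (nums.eraseIdx (max i j)).eraseIdx (min i j) := by
  rcases Nat.lt_or_ge i j with h | h
  · rw [pvRest_eq nums i j h, Nat.max_eq_right (le_of_lt h), Nat.min_eq_left (le_of_lt h)]
  · have h' : j < i := by omega
    rw [pvRest_comm, pvRest_eq nums j i h', Nat.max_eq_left (le_of_lt h'), Nat.min_eq_right (le_of_lt h')]

theorem pvOpsLoopA_append (cible : Int) (recur : List Int → Option (List String))
    (nombres : List Int) (i j a b : Int) (l₁ l₂ : List (String × (Int → Int → Int))) :
    pvOpsLoopA cible recur nombres i j a b (l₁ ++ l₂)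
      = match pvOpsLoopA cible recur nombres i j a b l₁ with
        | some r => some r
        | none => pvOpsLoopA cible recur nombres i j a b l₂ := by
  induction l₁ with
  | nil => simp [pvOpsLoopA]
  | cons p t ih =>
    obtain ⟨nom, op⟩ := p
    simp only [List.cons_append, pvOpsLoopA]
    split_ifs with h1 h2 h3
    · exact ih
    · rfl
    · cases recur (((nombres.eraseIdx (max i j).toNat).eraseIdx (min i j).toNat) ++ [op a b]) with
      | some s => rfl
      | none => exact ih
    · exact ih


theorem pvPairsLoopP_append (cible : Int) (nums : List Int) (ps qs : List (Nat × Nat)) :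
    pvPairsLoopP cible nums (ps ++ qs)
      = match pvPairsLoopP cible nums ps with
        | some r => some r
        | none => pvPairsLoopP cible nums qs := by
  induction ps with
  | nil => simp [pvPairsLoopP]
  | cons p t ih =>
    obtain ⟨i, j⟩ := p
    simp only [List.cons_append, pvPairsLoopP]
    cases pvCandLoopP cible nums i j (nums.getD i 0) (nums.getD j 0)
        (pvCandidates (nums.getD i 0) (nums.getD j 0)) with
    | some r => rfl
    | none => exact ih


theorem pvMem_pairs {n : Nat} {p : Nat × Nat} (hp : p ∈ pvPairs n) :
    p.1 < n ∧ p.2 < n ∧ p.1 ≠ p.2 := by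
  unfold pvPairs at hp
  simp only [List.mem_flatMap, List.mem_filterMap, List.mem_range] at hp
  obtain ⟨i, hi, j, hj, hij⟩ := hp
  by_cases h : i = j
  · simp [h] at hij
  · rw [if_pos h] at hij
    cases hij
    exact ⟨hi, hj, h⟩

theorem pvSortDesc_perm {xs ys : List Int} (h : xs.Perm ys) : pvSortDescB xs = pvSortDescB ys := by
  apply PySem.List.eq_of_perm_of_pairwise_le_of_injective (key := fun x : Int => -x) neg_injective
  · exact ((PySem.List.sorted_perm xs (fun x => x) true).trans h).trans
      (PySem.List.sorted_perm ys (fun x => x) true).symm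
  · exact (PySem.List.sorted_pairwise_rev xs (fun x => x)).imp (fun h => by simpa using h)
  · exact (PySem.List.sorted_pairwise_rev ys (fun x => x)).imp (fun h => by simpa using h)

theorem pvLeCompte_perm (cible : Int) {xs ys : List Int} (h : xs.Perm ys) :
    leCompte cible xs = leCompte cible ys := by
  have hs : pvSortDescA xs = pvSortDescA ys := pvSortDesc_perm h
  have hl : xs.length = ys.length := h.length_eq
  unfold leCompte
  rw [← hl]
  cases hL : xs.length with
  | zero => rfl
  | succ f => simp only [pvAuxA, hs]

theorem pvLeCompte_sortDesc (cible : Int) (xs : List Int) :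
    leCompte cible (pvSortDescB xs) = leCompte cible xs :=
  pvLeCompte_perm cible (PySem.List.sorted_perm xs (fun x => x) true)


theorem pvOpsLoopA_eq_candP (cible : Int) (fuel : Nat) (nums : List Int) (i j : Nat) (a b : Int)
    (hij : i ≠ j) (hi : i < nums.length) (hj : j < nums.length)
    (hfuel : fuel + 1 = nums.length)
    (ops : List (String × (Int → Int → Int)))
    (hops : ∀ p ∈ ops, ¬ (p.1 = "/" ∧ p.2 a b * b ≠ a)) :
    pvOpsLoopA cible (pvAuxA cible fuel) nums (i : Int) (j : Int) a b ops
      = pvCandLoopP cible nums i j a b (ops.map (fun p => (p.1, p.2 a b))) := by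
  have hmax : ((max (i : Int) (j : Int)).toNat) = max i j := by omega
  have hmin : ((min (i : Int) (j : Int)).toNat) = min i j := by omega
  have hrest : (nums.eraseIdx (max (i : Int) (j : Int)).toNat).eraseIdx (min (i : Int) (j : Int)).toNat
      = pvRestB nums i j := by rw [hmax, hmin, pvRest_eq' nums i j hij]
  have hlen : ∀ r : Int, (pvRestB nums i j ++ [r]).length = fuel := by
    intro r
    rw [pvRest_eq' nums i j hij]
    simp only [List.length_append, List.length_eraseIdx, List.length_cons, List.length_nil]
    have h1 : max i j < nums.length := by omega
    rw [if_pos h1]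
    have h2 : min i j < nums.length - 1 := by omega
    rw [if_pos h2]
    omega
  have hrec : ∀ r : Int, pvAuxA cible fuel (pvRestB nums i j ++ [r])
      = leCompte cible (pvSortDescB (pvRestB nums i j ++ [r])) := by
    intro r
    rw [pvLeCompte_sortDesc]
    unfold leCompte
    rw [hlen r]
  induction ops with
  | nil => rfl
  | cons p ops ih =>
    obtain ⟨nom, op⟩ := p
    have hguard : ¬ (nom = "/" ∧ op a b * b ≠ a) := by simpa using hops (nom, op) (by simp)
    simp only [pvOpsLoopA, pvCandLoopP, List.map_cons]
    rw [if_neg hguard]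
    by_cases hc : op a b = cible
    · rw [if_pos hc, if_pos hc, pvFmt_eq]
    · rw [if_neg hc, if_neg hc]
      by_cases h0r : op a b ≠ 0
      · rw [if_pos h0r, if_pos h0r, hrest, hrec (op a b)]
        cases leCompte cible (pvSortDescB (pvRestB nums i j ++ [op a b])) with
        | some sub => rw [pvFmt_eq]
        | none => exact ih (fun q hq => hops q (List.mem_cons_of_mem _ hq))
      · rw [if_neg h0r, if_neg h0r]
        exact ih (fun q hq => hops q (List.mem_cons_of_mem _ hq))

theorem pvPair_eq (cible : Int) (fuel : Nat) (nums : List Int) (i j : Nat)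
    (hij : i ≠ j) (hi : i < nums.length) (hj : j < nums.length)
    (h0 : (0 : Int) ∉ nums) (hfuel : fuel + 1 = nums.length) :
    pvOpsLoopA cible (pvAuxA cible fuel) nums (i : Int) (j : Int)
        (nums.getD i 0) (nums.getD j 0) pvOperations
      = pvCandLoopP cible nums i j (nums.getD i 0) (nums.getD j 0)
          (pvCandidates (nums.getD i 0) (nums.getD j 0)) := by
  set a := nums.getD i 0 with ha
  set b := nums.getD j 0 with hbd
  have hbmem : b ∈ nums := by rw [hbd, List.getD_eq_getElem nums 0 hj]; exact List.getElem_mem hj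
  have hb : b ≠ 0 := fun h => h0 (h ▸ hbmem)
  by_cases hdvd : PySem.Int.mod a b = 0
  · have hcand : pvCandidates a b = pvOperations.map (fun p => (p.1, p.2 a b)) := by
      simp [pvCandidates, pvOperations, if_pos (And.intro hb hdvd)]
    rw [hcand]
    apply pvOpsLoopA_eq_candP cible fuel nums i j a b hij hi hj hfuel
    intro p hp
    have hfd : PySem.Int.floordiv a b * b = a := by
      have := PySem.Int.floordiv_mul_add_mod a b
      omega
    simp only [pvOperations, List.mem_cons, List.not_mem_nil, or_false] at hp
    rcases hp with rfl | rfl | rfl | rfl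
    · rintro ⟨h1, -⟩; exact absurd h1 (by decide)
    · rintro ⟨h1, -⟩; exact absurd h1 (by decide)
    · rintro ⟨h1, -⟩; exact absurd h1 (by decide)
    · rintro ⟨-, h2⟩; exact h2 hfd
  · have hfd : PySem.Int.floordiv a b * b ≠ a := by
      have := PySem.Int.floordiv_mul_add_mod a b
      intro h; apply hdvd; omega
    have hsplit : pvOperations
        = [(("+" : String), fun x y : Int => x + y), ("-", fun x y => x - y), ("*", fun x y => x * y)]
          ++ [("/", fun x y => PySem.Int.floordiv x y)] := rfl
    rw [hsplit, pvOpsLoopA_append]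
    have hdiv : pvOpsLoopA cible (pvAuxA cible fuel) nums (i : Int) (j : Int) a b
        [("/", fun x y => PySem.Int.floordiv x y)] = none := by
      simp [pvOpsLoopA, hfd]
    rw [hdiv]
    have h3 := pvOpsLoopA_eq_candP cible fuel nums i j a b hij hi hj hfuel
      [(("+" : String), fun x y : Int => x + y), ("-", fun x y => x - y), ("*", fun x y => x * y)]
      (by intro p hp
          simp only [List.mem_cons, List.not_mem_nil, or_false] at hp
          rcases hp with rfl | rfl | rfl <;> (rintro ⟨h1, -⟩; exact absurd h1 (by decide)))
    simp only [List.map_cons, List.map_nil] at h3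
    have hcand : pvCandidates a b = [(("+" : String), a + b), ("-", a - b), ("*", a * b)] := by
      simp [pvCandidates, hdvd]
    rw [hcand, h3]
    cases pvCandLoopP cible nums i j a b [(("+" : String), a + b), ("-", a - b), ("*", a * b)] with
    | some r => rfl
    | none => rfl

theorem pvJLoopA_eq (cible : Int) (fuel : Nat) (nums : List Int)
    (h0 : (0 : Int) ∉ nums) (hfuel : fuel + 1 = nums.length)
    (i : Nat) (hi : i < nums.length) (js : List Nat) (hjs : ∀ j ∈ js, j < nums.length) :
    pvJLoopA cible (pvAuxA cible fuel) nums (i : Int) (js.map (fun (j : Nat) => (j : Int)))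
      = pvPairsLoopP cible nums (js.filterMap (fun j => if i ≠ j then some (i, j) else none)) := by
  induction js with
  | nil => rfl
  | cons j js ih =>
    have hj : j < nums.length := hjs j (by simp)
    have hjs' : ∀ x ∈ js, x < nums.length := fun x hx => hjs x (List.mem_cons_of_mem _ hx)
    simp only [List.map_cons, List.filterMap_cons]
    by_cases hij : i = j
    · subst hij
      rw [pvJLoopA.eq_2, if_pos rfl, if_neg (fun h : i ≠ i => h rfl)]
      exact ih hjs'
    · have hijZ : ¬ ((i : Int) = (j : Int)) := fun h => hij (by exact_mod_cast h)
      simp only [pvJLoopA, if_neg hijZ]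
      rw [PySem.List.pyGetD_natCast nums i 0, PySem.List.pyGetD_natCast nums j 0]
      rw [pvPair_eq cible fuel nums i j hij hi hj h0 hfuel]
      rw [if_pos hij]
      simp only [pvPairsLoopP]
      cases pvCandLoopP cible nums i j (nums.getD i 0) (nums.getD j 0)
          (pvCandidates (nums.getD i 0) (nums.getD j 0)) with
      | some r => rfl
      | none => exact ih hjs'

theorem pvILoopA_eq (cible : Int) (fuel : Nat) (nums : List Int)
    (h0 : (0 : Int) ∉ nums) (hfuel : fuel + 1 = nums.length)
    (is : List Nat) (his : ∀ i ∈ is, i < nums.length) :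
    pvILoopA cible (pvAuxA cible fuel) nums (is.map (fun (i : Nat) => (i : Int)))
      = pvPairsLoopP cible nums (is.flatMap (fun i =>
          (List.range nums.length).filterMap (fun j => if i ≠ j then some (i, j) else none))) := by
  induction is with
  | nil => rfl
  | cons i is ih =>
    have hi : i < nums.length := his i (by simp)
    have his' : ∀ x ∈ is, x < nums.length := fun x hx => his x (List.mem_cons_of_mem _ hx)
    rw [List.map_cons, List.flatMap_cons, pvPairsLoopP_append, pvILoopA.eq_2]
    rw [PySem.List.pyRange_zero_nat nums.length]
    rw [pvJLoopA_eq cible fuel nums h0 hfuel i hi (List.range nums.length)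
      (fun j hjx => List.mem_range.mp hjx)]
    cases pvPairsLoopP cible nums
        ((List.range nums.length).filterMap fun j => if i ≠ j then some (i, j) else none) with
    | some r => rfl
    | none => exact ih his'

theorem pvUnfoldA (cible : Int) (nums : List Int) (hs : pvSortDescB nums = nums)
    (h2 : 2 ≤ nums.length) (h0 : (0 : Int) ∉ nums) :
    leCompte cible nums = pvPairsLoopP cible nums (pvPairs nums.length) := by
  obtain ⟨fuel, hfuel⟩ : ∃ f, nums.length = f + 1 := ⟨nums.length - 1, by omega⟩
  have hsA : pvSortDescA nums = nums := by rw [pvSort_eq]; exact hs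
  unfold leCompte
  conv_lhs => rw [hfuel]
  simp only [pvAuxA, hsA]
  rw [if_neg (by omega)]
  rw [PySem.List.pyRange_zero_nat nums.length]
  rw [pvILoopA_eq cible fuel nums h0 hfuel.symm (List.range nums.length)
    (fun i hix => List.mem_range.mp hix)]
  rfl

theorem pvSortDesc_idem (xs : List Int) : pvSortDescB (pvSortDescB xs) = pvSortDescB xs :=
  PySem.List.sorted_rev_sorted_rev xs (fun x => x)

theorem pvCandLoopB_eq (cible : Int) (fuel : Nat) (nums : List Int) (i j : Nat) (a b : Int)
    (hi : i < nums.length) (hj : j < nums.length) (hij : i ≠ j)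
    (h0 : (0 : Int) ∉ nums)
    (IH : ∀ (nums' : List Int) (memo' : PvMemo), (0 : Int) ∉ nums' → nums'.length ≤ fuel →
      pvSortDescB nums' = nums' → pvInv cible memo' →
      (pvSearchB cible fuel nums' memo').1 = leCompte cible nums' ∧
      pvInv cible (pvSearchB cible fuel nums' memo').2)
    (hn : nums.length ≤ fuel + 1) :
    ∀ (cs : List (String × Int)) (memo : PvMemo), pvInv cible memo →
      (pvCandLoopB cible (pvSearchB cible fuel) nums i j a b cs memo).1
        = pvCandLoopP cible nums i j a b cs
      ∧ pvInv cible (pvCandLoopB cible (pvSearchB cible fuel) nums i j a b cs memo).2 := by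
  intro cs
  induction cs with
  | nil => intro memo hm; exact ⟨rfl, hm⟩
  | cons c cs ih =>
    obtain ⟨nom, r⟩ := c
    intro memo hm
    simp only [pvCandLoopB, pvCandLoopP]
    by_cases hc : r = cible
    · rw [if_pos hc, if_pos hc]
      exact ⟨rfl, hm⟩
    · rw [if_neg hc, if_neg hc]
      by_cases hr0 : r ≠ 0
      · rw [if_pos hr0, if_pos hr0]
        have hmem : (0 : Int) ∉ pvSortDescB (pvRestB nums i j ++ [r]) := by
          intro hx
          simp only [pvSortDescB, PySem.List.mem_sorted] at hx
          rcases List.mem_append.mp hx with h | h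
          · apply h0
            have hsub : pvRestB nums i j ⊆ nums := by
              rw [pvRest_eq' nums i j hij]
              exact ((List.eraseIdx_sublist _ _).trans (List.eraseIdx_sublist _ _)).subset
            exact hsub h
          · exact hr0 (List.mem_singleton.mp h).symm
        have hlen : (pvSortDescB (pvRestB nums i j ++ [r])).length ≤ fuel := by
          simp only [pvSortDescB, PySem.List.length_sorted]
          simp only [List.length_append, List.length_cons, List.length_nil]
          rw [pvRest_eq' nums i j hij]
          simp only [List.length_eraseIdx]
          have h1 : max i j < nums.length := by omega
          rw [if_pos h1]
          have h2 : min i j < nums.length - 1 := by omega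
          rw [if_pos h2]
          omega
        obtain ⟨hv, hinv2⟩ := IH (pvSortDescB (pvRestB nums i j ++ [r])) memo hmem hlen
          (pvSortDesc_idem _) hm
        cases hX : pvSearchB cible fuel (pvSortDescB (pvRestB nums i j ++ [r])) memo with
        | mk o m' =>
          rw [hX] at hv hinv2
          replace hv : o = leCompte cible (pvSortDescB (pvRestB nums i j ++ [r])) := hv
          replace hinv2 : pvInv cible m' := hinv2
          cases o with
          | some sub =>
            refine ⟨?_, hinv2⟩
            rw [← hv]
          | none =>
            obtain ⟨h1, h2⟩ := ih m' hinv2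
            exact ⟨by rw [← hv]; exact h1, h2⟩
      · rw [if_neg hr0, if_neg hr0]
        exact ih memo hm

theorem pvPairsLoopB_eq (cible : Int) (fuel : Nat) (nums : List Int)
    (h0 : (0 : Int) ∉ nums)
    (IH : ∀ (nums' : List Int) (memo' : PvMemo), (0 : Int) ∉ nums' → nums'.length ≤ fuel →
      pvSortDescB nums' = nums' → pvInv cible memo' →
      (pvSearchB cible fuel nums' memo').1 = leCompte cible nums' ∧
      pvInv cible (pvSearchB cible fuel nums' memo').2)
    (hn : nums.length ≤ fuel + 1) :
    ∀ (ps : List (Nat × Nat)) (memo : PvMemo),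
      (∀ p ∈ ps, p.1 < nums.length ∧ p.2 < nums.length ∧ p.1 ≠ p.2) → pvInv cible memo →
      (pvPairsLoopB cible (pvSearchB cible fuel) nums ps memo).1 = pvPairsLoopP cible nums ps
      ∧ pvInv cible (pvPairsLoopB cible (pvSearchB cible fuel) nums ps memo).2 := by
  intro ps
  induction ps with
  | nil => intro memo _ hm; exact ⟨rfl, hm⟩
  | cons p ps ih =>
    obtain ⟨i, j⟩ := p
    intro memo hps hm
    obtain ⟨hi, hj, hij⟩ := hps (i, j) (by simp)
    have hps' := fun q hq => hps q (List.mem_cons_of_mem _ hq)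
    simp only [pvPairsLoopB, pvPairsLoopP]
    obtain ⟨hv, hinv2⟩ := pvCandLoopB_eq cible fuel nums i j (nums.getD i 0) (nums.getD j 0)
      hi hj hij h0 IH hn (pvCandidates (nums.getD i 0) (nums.getD j 0)) memo hm
    cases hX : pvCandLoopB cible (pvSearchB cible fuel) nums i j (nums.getD i 0) (nums.getD j 0)
        (pvCandidates (nums.getD i 0) (nums.getD j 0)) memo with
    | mk o m' =>
      rw [hX] at hv hinv2
      replace hv : o = pvCandLoopP cible nums i j (nums.getD i 0) (nums.getD j 0)
          (pvCandidates (nums.getD i 0) (nums.getD j 0)) := hv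
      replace hinv2 : pvInv cible m' := hinv2
      cases o with
      | some r =>
        refine ⟨?_, hinv2⟩
        rw [← hv]
      | none =>
        obtain ⟨h1, h2⟩ := ih m' hps' hinv2
        exact ⟨by rw [← hv]; exact h1, h2⟩

theorem pvMainB (cible : Int) (fuel : Nat) :
    ∀ (nums : List Int) (memo : PvMemo), (0 : Int) ∉ nums → nums.length ≤ fuel →
      pvSortDescB nums = nums → pvInv cible memo →
      (pvSearchB cible fuel nums memo).1 = leCompte cible nums ∧
      pvInv cible (pvSearchB cible fuel nums memo).2 := by
  induction fuel with
  | zero =>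
    intro nums memo h0 hlen hs hm
    rcases nums with _ | ⟨x, t⟩
    · exact ⟨rfl, hm⟩
    · simp at hlen
  | succ fuel IH =>
    intro nums memo h0 hlen hs hm
    simp only [pvSearchB]
    cases hmemo : memo.get? nums with
    | some v => exact ⟨hm nums v hmemo, hm⟩
    | none =>
      by_cases h2 : nums.length < 2
      · rw [if_pos h2]
        have hsA : pvSortDescA nums = nums := by rw [pvSort_eq]; exact hs
        have hnone : leCompte cible nums = none := by
          unfold leCompte
          cases hl : nums.length with
          | zero => rfl
          | succ n =>
            have hn0 : n = 0 := by omega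
            subst hn0
            simp only [pvAuxA, hsA]
            rw [if_pos (by omega)]
        refine ⟨hnone.symm, ?_⟩
        intro k v hk
        by_cases hkn : k = nums
        · subst hkn
          rw [PySem.Dict.get?_insert_self] at hk
          cases hk
          exact hnone.symm
        · rw [PySem.Dict.get?_insert_of_ne _ _ hkn] at hk
          exact hm k v hk
      · rw [if_neg h2]
        obtain ⟨hv, hinv⟩ := pvPairsLoopB_eq cible fuel nums h0 IH hlen
          (pvPairs nums.length) memo (fun p hp => pvMem_pairs hp) hm
        have hval : pvPairsLoopP cible nums (pvPairs nums.length) = leCompte cible nums :=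
          (pvUnfoldA cible nums hs (by omega) h0).symm
        refine ⟨hv.trans hval, ?_⟩
        intro k v hk
        by_cases hkn : k = nums
        · subst hkn
          rw [PySem.Dict.get?_insert_self] at hk
          cases hk
          exact hv.trans hval
        · rw [PySem.Dict.get?_insert_of_ne _ _ hkn] at hk
          exact hinv k v hk

-- ===== VERDICT (by name: the statement is the Claim_ definition above) =====
theorem leCompte_spec : Claim_equal_leCompte := by
  intro cible nombres _ hpre
  unfold Spec_leCompte leCompte_alt
  have hperm := PySem.List.sorted_perm nombres (fun x : Int => x) true
  have h0 : (0 : Int) ∉ pvSortDescB nombres := fun h => hpre (hperm.mem_iff.mp h)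
  have hmain := pvMainB cible (pvSortDescB nombres).length (pvSortDescB nombres)
    PySem.Dict.empty h0 le_rfl (pvSortDesc_idem nombres)
    (by intro k v h; simp [PySem.Dict.get?, PySem.Dict.empty] at h)
  rw [hmain.1, pvLeCompte_sortDesc]
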